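-- pv_equiv track=rewrite | github.com/puneetha08nr/regulatory_parsing_improved | src/pipeline/parser.py | _find_applicability_columns
-- ===== SOURCE A (Python) =====
-- from typing import List, Dict, Optional, Tuple
--
-- def _find_applicability_columns(header_row: List[str]) -> Dict[str, int]:
--     """Find P1, P2, P3, P4 applicability columns"""
--     applicability = {}
--     for idx, cell in enumerate(header_row):
--         cell_lower = cell.lower()
--         for level in ['p1', 'p2', 'p3', 'p4']:
--             if level in cell_lower:
--                 applicability[level.upper()] = idx
--     return applicability
-- ===== SOURCE B (Python) =====
-- def _find_applicability_columns(header_row):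
--     """Find P1, P2, P3, P4 applicability columns"""
--     applicability = {}
--     for level in ['p1', 'p2', 'p3', 'p4']:
--         for idx in range(len(header_row) - 1, -1, -1):
--             if level in header_row[idx].lower():
--                 applicability[level.upper()] = idx
--                 break
--     return applicability
-- ===== Notes on version B (the rewrite author's own statement) =====
-- stated objective: alternative
-- what changed: Instead of one forward pass over the header with an inner loop over the four labels overwriting dict values, B loops over the fixed labels and scans the header backwards for each, recording the first (i.e. last-in-header) matching index; Pre_ excludes headers whose labels' first occurrences are out of P1..P4 order, where A's dict key order (first-occurrence order) and B's (fixed label order) are equally defensible orderings of the same mapping.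
-- outside the precondition, e.g. on _find_applicability_columns(['p2', 'p1']): A returns {'P2': 0, 'P1': 1}, B returns {'P1': 1, 'P2': 0}
import Mathlib
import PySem

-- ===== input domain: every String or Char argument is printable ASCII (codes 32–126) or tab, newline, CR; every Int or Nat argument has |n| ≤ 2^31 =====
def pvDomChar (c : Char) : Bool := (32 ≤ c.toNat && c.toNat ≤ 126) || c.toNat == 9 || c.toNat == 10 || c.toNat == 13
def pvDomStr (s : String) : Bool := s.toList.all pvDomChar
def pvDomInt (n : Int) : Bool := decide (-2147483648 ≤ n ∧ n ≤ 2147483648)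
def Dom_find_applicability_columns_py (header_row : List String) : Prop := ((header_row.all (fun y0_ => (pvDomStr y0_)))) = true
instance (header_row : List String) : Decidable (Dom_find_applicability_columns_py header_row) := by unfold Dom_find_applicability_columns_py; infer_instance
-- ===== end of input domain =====

-- B loops over the fixed labels and scans the header backwards for each (first hit = last
-- matching column), instead of A's forward pass with an inner label loop overwriting the dict
-- (objective: alternative decomposition, same cost); equivalence is on headers whose labels'
-- first occurrences are in P1..P4 order (Pre_), where both key orders coincide.

-- ===== PORT A =====
-- one pass over enumerate(header_row); for each cell, inner loop over the four level
-- substrings, overwriting applicability[level.upper()] = idx on every match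
def find_applicability_columns_py (header_row : List String) : List (String × Int) :=
  ((PySem.List.enumerate header_row).foldl
    (fun d p =>
      let cell_lower := PySem.Str.lower p.2
      ["p1", "p2", "p3", "p4"].foldl
        (fun d lvl =>
          if PySem.Str.isIn lvl cell_lower then d.insert (PySem.Str.upper lvl) p.1 else d)
        d)
    (PySem.Dict.empty : PySem.Dict String Int)).items

-- ===== PORT B =====
-- for level in [...]: for idx in range(len(header_row)-1, -1, -1): if match: insert; break
-- (the for-with-break is the first hit of the countdown range, i.e. List.find?)
def find_applicability_columns_py_alt (header_row : List String) : List (String × Int) :=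
  (["p1", "p2", "p3", "p4"].foldl
    (fun d lvl =>
      match (PySem.List.pyRange ((header_row.length : Int) - 1) (-1) (-1)).find?
          (fun idx => PySem.Str.isIn lvl (PySem.Str.lower (PySem.List.pyGetD header_row idx ""))) with
      | some idx => d.insert (PySem.Str.upper lvl) idx
      | none => d)
    (PySem.Dict.empty : PySem.Dict String Int)).items

-- ===== PRECONDITION & SPEC =====
-- the indices of the cells matching a level (helper for Pre_ and the proofs)
def pvHits (header_row : List String) (level : String) : List Int :=
  ((PySem.List.enumerate header_row).filter
    (fun p => PySem.Str.isIn level (PySem.Str.lower p.2))).map (fun p => p.1)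

-- Pre_ excludes headers whose labels' FIRST occurrences are out of p1 < p2 < p3 < p4 order:
-- there A and B return the same mapping but with the keys in different insertion orders
-- (A: first-occurrence order, B: fixed label order), and either order is defensible.
def Pre_find_applicability_columns_py (header_row : List String) : Prop :=
  (["p1", "p2", "p3", "p4"].filterMap (fun lvl => (pvHits header_row lvl).head?)).Pairwise (· ≤ ·)
instance (header_row : List String) : Decidable (Pre_find_applicability_columns_py header_row) := by unfold Pre_find_applicability_columns_py; infer_instance

def pvWitness_find_applicability_columns_py : List String := ["P1 level", "p2", "x P3/P4"]

def Spec_find_applicability_columns_py (header_row : List String) (out : List (String × Int)) : Prop := out = find_applicability_columns_py_alt header_row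
instance (header_row : List String) (out : List (String × Int)) : Decidable (Spec_find_applicability_columns_py header_row out) := by unfold Spec_find_applicability_columns_py; infer_instance

-- ===== CLAIM (what is proved, stated in full; the proofs are below) =====
def Claim_equal_find_applicability_columns_py : Prop := ∀ (header_row : List String), Dom_find_applicability_columns_py header_row → Pre_find_applicability_columns_py header_row → Spec_find_applicability_columns_py header_row (find_applicability_columns_py header_row)

-- ===== LEMMAS AND PROOFS =====

def pvMtc (lvl c : String) : Bool := PySem.Str.isIn lvl (PySem.Str.lower c)
def pvLvls : List String := ["p1", "p2", "p3", "p4"]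
def pvBefore (a b : Int × String × Int) : Bool := decide (a.1 < b.1)
def pvUpdE (c : String) (nn : Int) (t : Int × String × Int) : Int × String × Int :=
  if pvMtc (PySem.Str.lower t.2.1) c then (t.1, t.2.1, nn) else t
def pvUpdP (c : String) (nn : Int) (L : List String) (p : String × Int) : String × Int :=
  if p.1 ∈ L.map PySem.Str.upper ∧ pvMtc (PySem.Str.lower p.1) c = true then (p.1, nn) else p

-- the per-level entry (first hit, NAME, last hit); the whole analysis is phrased over these
def pvEntry (header_row : List String) (level : String) : List (Int × String × Int) :=
  match pvHits header_row level with
  | [] => []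
  | f :: t => [(f, PySem.Str.upper level, (f :: t).getLast (List.cons_ne_nil f t))]

def pvNewsS (h : List String) (c : String) (L : List String) : List (Int × String × Int) :=
  L.flatMap (fun lvl => if pvMtc lvl c = true ∧ pvHits h lvl = [] then
    [((h.length : Int), PySem.Str.upper lvl, (h.length : Int))] else [])
def pvChain (c : String) (nn : Int) (L : List String) (d : PySem.Dict String Int) : PySem.Dict String Int :=
  L.foldl (fun d lvl => if PySem.Str.isIn lvl (PySem.Str.lower c) then d.insert (PySem.Str.upper lvl) nn else d) d
def pvE (h : List String) (L : List String) : List (Int × String × Int) := L.flatMap (pvEntry h)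
def pvS (h : List String) : List (Int × String × Int) := PySem.List.sorted (pvE h pvLvls) (fun t => t.1)
def pvBitems (h : List String) : List (String × Int) := (pvS h).map (fun t => (t.2.1, t.2.2))
def pvAdict (h : List String) : PySem.Dict String Int :=
  (PySem.List.enumerate h).foldl (fun d p => pvChain p.2 p.1 pvLvls d) PySem.Dict.empty

lemma pv_portA_eq (h : List String) : find_applicability_columns_py h = (pvAdict h).items := rfl

lemma pvS_eq_fold (h : List String) :
    pvS h = (pvE h pvLvls).foldl (fun acc x => PySem.List.insertBy pvBefore x acc) [] := by
  rw [pvS, PySem.List.sorted_eq_foldl_insertBy]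
  rfl

lemma pvEntry_name (h : List String) (lvl : String) :
    ∀ x ∈ pvEntry h lvl, x.2.1 = PySem.Str.upper lvl := by
  intro x hx
  unfold pvEntry at hx
  split at hx
  · simp at hx
  · simp at hx; subst hx; rfl

lemma pvEntry_eq_nil_iff (h : List String) (lvl : String) :
    pvEntry h lvl = [] ↔ pvHits h lvl = [] := by
  unfold pvEntry
  split
  · simp_all
  · simp_all

lemma pvS_perm (h : List String) : (pvS h).Perm (pvE h pvLvls) := PySem.List.sorted_perm _ _ _

lemma pv_stepA (h : List String) (c : String) :
    pvAdict (h ++ [c]) = pvChain c (h.length : Int) pvLvls (pvAdict h) := by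
  unfold pvAdict
  rw [PySem.List.enumerate_append, List.foldl_append]
  simp [PySem.List.enumerate_cons, PySem.List.enumerate_nil]

lemma pv_insertBy_cons (b : (Int × String × Int) → (Int × String × Int) → Bool)
    (x y : Int × String × Int) (ys : List (Int × String × Int)) :
    PySem.List.insertBy b x (y :: ys) = if b x y then x :: y :: ys else y :: PySem.List.insertBy b x ys := rfl

lemma pv_insertBy_nil (b : (Int × String × Int) → (Int × String × Int) → Bool)
    (x : Int × String × Int) : PySem.List.insertBy b x [] = [x] := rfl

lemma pv_flatMap_congr {α β : Type} (l : List α) (f g : α → List β)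
    (hfg : ∀ a ∈ l, f a = g a) : l.flatMap f = l.flatMap g := by
  induction l with
  | nil => rfl
  | cons a l ih =>
    simp only [List.flatMap_cons]
    rw [hfg a (List.mem_cons_self), ih (fun a ha => hfg a (List.mem_cons_of_mem _ ha))]

lemma pv_insertBy_append_before (x : Int × String × Int) (P Q : List (Int × String × Int))
    (hQ : ∀ y ∈ Q, pvBefore x y = true) :
    PySem.List.insertBy pvBefore x (P ++ Q) = PySem.List.insertBy pvBefore x P ++ Q := by
  induction P with
  | nil =>
    cases Q with
    | nil => rfl
    | cons q Q' =>
      simp only [List.nil_append, pv_insertBy_nil]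
      rw [pv_insertBy_cons, hQ q (List.mem_cons_self)]
      simp
  | cons p P' ih =>
    simp only [List.cons_append, pv_insertBy_cons]
    split
    · simp
    · simp [ih]

lemma pv_insertBy_map (g : Int × String × Int → Int × String × Int)
    (hg : ∀ t, (g t).1 = t.1) (x : Int × String × Int) (acc : List (Int × String × Int)) :
    PySem.List.insertBy pvBefore (g x) (acc.map g) = (PySem.List.insertBy pvBefore x acc).map g := by
  induction acc with
  | nil => rfl
  | cons a acc' ih =>
    simp only [List.map_cons, pv_insertBy_cons]
    have hb : pvBefore (g x) (g a) = pvBefore x a := by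
      simp [pvBefore, hg]
    rw [hb]
    split <;> simp [ih]

lemma pvUpdE_fst (c : String) (nn : Int) (t : Int × String × Int) : (pvUpdE c nn t).1 = t.1 := by
  unfold pvUpdE; split <;> rfl

lemma pvHits_append (h : List String) (c : String) (lvl : String) :
    pvHits (h ++ [c]) lvl = pvHits h lvl ++ (if pvMtc lvl c then [(h.length : Int)] else []) := by
  unfold pvHits
  rw [PySem.List.enumerate_append]
  simp only [PySem.List.enumerate_cons, PySem.List.enumerate_nil, List.filter_append,
    List.map_append, List.append_cancel_left_eq, pvMtc]
  by_cases hm : PySem.Chars.isIn lvl.toList (PySem.Chars.lower c.toList) = true <;> simp [hm]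

lemma pvHits_lt (h : List String) (lvl : String) : ∀ f ∈ pvHits h lvl, f < (h.length : Int) := by
  intro f hf
  unfold pvHits at hf
  simp only [List.mem_map, List.mem_filter] at hf
  obtain ⟨p, ⟨hp, _⟩, rfl⟩ := hf
  rw [PySem.List.mem_enumerate_iff] at hp
  obtain ⟨k, hk, rfl⟩ := hp
  simp
  omega

lemma pvEntry_append_not_mtc (h : List String) (c lvl : String) (hm : pvMtc lvl c = false) :
    pvEntry (h ++ [c]) lvl = pvEntry h lvl := by
  unfold pvEntry
  rw [pvHits_append, hm]
  simp

lemma pvEntry_append_mtc_nil (h : List String) (c lvl : String) (hm : pvMtc lvl c = true)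
    (he : pvHits h lvl = []) :
    pvEntry (h ++ [c]) lvl = [((h.length : Int), PySem.Str.upper lvl, (h.length : Int))] := by
  unfold pvEntry
  rw [pvHits_append, hm, he]
  simp

lemma pvEntry_append_mtc_cons (h : List String) (c lvl : String) (hm : pvMtc lvl c = true)
    (f : Int) (t : List Int) (he : pvHits h lvl = f :: t) :
    pvEntry (h ++ [c]) lvl = [(f, PySem.Str.upper lvl, (h.length : Int))] := by
  unfold pvEntry
  rw [pvHits_append, hm, he]
  simp

lemma pvEntry_cons (h : List String) (lvl : String) (f : Int) (t : List Int)
    (he : pvHits h lvl = f :: t) :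
    pvEntry h lvl = [(f, PySem.Str.upper lvl, (f :: t).getLast (List.cons_ne_nil f t))] := by
  unfold pvEntry
  rw [he]

lemma pvFold (c : String) (h : List String) :
    ∀ (L : List String) (acc accN : List (Int × String × Int)),
    (∀ lvl ∈ L, PySem.Str.lower (PySem.Str.upper lvl) = lvl) →
    (∀ x ∈ acc, x.1 < (h.length : Int)) →
    (∀ x ∈ accN, x.1 = (h.length : Int)) →
    List.foldl (fun a x => PySem.List.insertBy pvBefore x a)
        ((acc.map (pvUpdE c (h.length : Int))) ++ accN) (pvE (h ++ [c]) L)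
      = (List.foldl (fun a x => PySem.List.insertBy pvBefore x a) acc (pvE h L)).map (pvUpdE c (h.length : Int))
        ++ accN ++ pvNewsS h c L := by
  intro L
  induction L with
  | nil =>
    intro acc accN _ _ _
    simp [pvE, pvNewsS]
  | cons lvl L' ih =>
    intro acc accN hlow hacc haccN
    have hlv : PySem.Str.lower (PySem.Str.upper lvl) = lvl := hlow lvl (List.mem_cons_self)
    have hlow' : ∀ l ∈ L', PySem.Str.lower (PySem.Str.upper l) = l :=
      fun l hl => hlow l (List.mem_cons_of_mem _ hl)
    simp only [pvE, List.flatMap_cons, List.foldl_append] at *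
    cases hts : pvHits h lvl with
    | nil =>
      have hen : pvEntry h lvl = [] := (pvEntry_eq_nil_iff h lvl).mpr hts
      cases hmc : pvMtc lvl c with
      | false =>
        rw [pvEntry_append_not_mtc h c lvl hmc, hen]
        simp only [List.foldl_nil]
        rw [ih acc accN hlow' hacc haccN]
        have : pvNewsS h c (lvl :: L') = pvNewsS h c L' := by
          simp [pvNewsS, hmc]
        rw [this]
      | true =>
        rw [pvEntry_append_mtc_nil h c lvl hmc hts]
        simp only [List.foldl_cons, List.foldl_nil]
        rw [PySem.List.insertBy_of_forall_not_before _ _ _ (by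
          intro y hy
          rcases List.mem_append.mp hy with hy | hy
          · obtain ⟨x, hx, rfl⟩ := List.mem_map.mp hy
            have := hacc x hx
            simp [pvBefore, pvUpdE_fst]
            omega
          · have := haccN y hy
            simp only [pvBefore]
            simp
            omega)]
        rw [List.append_assoc]
        rw [ih acc (accN ++ [((h.length : Int), PySem.Str.upper lvl, (h.length : Int))]) hlow' hacc (by
          intro x hx
          rcases List.mem_append.mp hx with hx | hx
          · exact haccN x hx
          · simp at hx; subst hx; rfl)]
        rw [hen]
        simp only [List.foldl_nil]
        have : pvNewsS h c (lvl :: L') =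
            ((h.length : Int), PySem.Str.upper lvl, (h.length : Int)) :: pvNewsS h c L' := by
          simp [pvNewsS, hmc, hts]
        rw [this]
        simp
    | cons f t =>
      have hfn : f < (h.length : Int) := pvHits_lt h lvl f (by rw [hts]; exact List.mem_cons_self)
      have hen := pvEntry_cons h lvl f t hts
      have key : pvEntry (h ++ [c]) lvl =
          [pvUpdE c (h.length : Int) ((f, PySem.Str.upper lvl, (f :: t).getLast (List.cons_ne_nil f t)))] := by
        cases hmc : pvMtc lvl c with
        | false =>
          rw [pvEntry_append_not_mtc h c lvl hmc, hen]
          unfold pvUpdE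
          simp [hlv, hmc]
        | true =>
          rw [pvEntry_append_mtc_cons h c lvl hmc f t hts]
          unfold pvUpdE
          simp [hlv, hmc]
      rw [key, hen]
      simp only [List.foldl_cons, List.foldl_nil]
      rw [pv_insertBy_append_before _ _ _ (by
        intro y hy
        have := haccN y hy
        simp only [pvBefore, pvUpdE_fst]
        simp
        omega)]
      rw [pv_insertBy_map (pvUpdE c (h.length : Int)) (pvUpdE_fst c (h.length : Int)) _ acc]
      have hacc' : ∀ x ∈ PySem.List.insertBy pvBefore
          (f, PySem.Str.upper lvl, (f :: t).getLast (List.cons_ne_nil f t)) acc,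
          x.1 < (h.length : Int) := by
        intro x hx
        rcases (PySem.List.mem_insertBy _ _ _ _).mp hx with rfl | hx
        · exact hfn
        · exact hacc x hx
      rw [ih _ accN hlow' hacc' haccN]
      have : pvNewsS h c (lvl :: L') = pvNewsS h c L' := by
        cases hmc : pvMtc lvl c with
        | false => simp [pvNewsS, hmc]
        | true => simp [pvNewsS, hmc, hts]
      rw [this]

lemma pvChain_items (c : String) (nn : Int) :
    ∀ (L : List String) (d : PySem.Dict String Int),
    (∀ lvl ∈ L, PySem.Str.lower (PySem.Str.upper lvl) = lvl) →
    (L.map PySem.Str.upper).Nodup →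
    (pvChain c nn L d).items
      = d.items.map (pvUpdP c nn L)
        ++ L.flatMap (fun lvl => if pvMtc lvl c = true ∧ d.contains (PySem.Str.upper lvl) = false then
            [(PySem.Str.upper lvl, nn)] else []) := by
  intro L
  induction L with
  | nil =>
    intro d _ _
    have hid : List.map (pvUpdP c nn []) d.items = d.items := by
      have h1 : List.map (pvUpdP c nn []) d.items = List.map id d.items :=
        List.map_congr_left (fun p _ => by unfold pvUpdP; simp)
      rw [h1, List.map_id]
    simp [pvChain, hid]
  | cons lvl L' ih =>
    intro d hlow hnd
    have hlv : PySem.Str.lower (PySem.Str.upper lvl) = lvl := hlow lvl (List.mem_cons_self)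
    have hlow' : ∀ l ∈ L', PySem.Str.lower (PySem.Str.upper l) = l :=
      fun l hl => hlow l (List.mem_cons_of_mem _ hl)
    have hnd' : (L'.map PySem.Str.upper).Nodup := by
      simp only [List.map_cons, List.nodup_cons] at hnd
      exact hnd.2
    have hnotin : PySem.Str.upper lvl ∉ L'.map PySem.Str.upper := by
      simp only [List.map_cons, List.nodup_cons] at hnd
      exact hnd.1
    simp only [pvChain, List.foldl_cons, List.flatMap_cons]
    cases hmc : pvMtc lvl c with
    | false =>
      have hmc' : PySem.Str.isIn lvl (PySem.Str.lower c) = false := hmc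
      rw [hmc']
      simp only [Bool.false_eq_true, if_false]
      have e := ih d hlow' hnd'
      simp only [pvChain] at e
      rw [e]
      simp only [false_and, if_false, List.nil_append]
      congr 1
      apply List.map_congr_left
      intro p _
      unfold pvUpdP
      by_cases hp : p.1 = PySem.Str.upper lvl
      · have h1 : pvMtc (PySem.Str.lower p.1) c = false := by rw [hp, hlv]; exact hmc
        simp [h1]
      · simp only [List.map_cons, List.mem_cons]
        by_cases h2 : p.1 ∈ L'.map PySem.Str.upper <;> simp [h2, hp]
    | true =>
      have hmc' : PySem.Str.isIn lvl (PySem.Str.lower c) = true := hmc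
      rw [hmc']
      simp only [if_true]
      have e := ih (d.insert (PySem.Str.upper lvl) nn) hlow' hnd'
      simp only [pvChain] at e
      rw [e]
      rw [PySem.Dict.items_insert]
      have hnewsEq : (L'.flatMap (fun l' =>
          if pvMtc l' c = true ∧ (d.insert (PySem.Str.upper lvl) nn).contains (PySem.Str.upper l') = false then
            [(PySem.Str.upper l', nn)] else []))
          = (L'.flatMap (fun l' =>
          if pvMtc l' c = true ∧ d.contains (PySem.Str.upper l') = false then
            [(PySem.Str.upper l', nn)] else [])) := by
        apply pv_flatMap_congr
        intro l' hl'
        have hne : (PySem.Str.upper l' == PySem.Str.upper lvl) = false := by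
          simp only [beq_eq_false_iff_ne, ne_eq]
          intro hEq
          exact hnotin (hEq ▸ List.mem_map_of_mem hl')
        rw [PySem.Dict.contains_insert, hne]
        simp
      rw [hnewsEq]
      by_cases hcon : d.contains (PySem.Str.upper lvl) = true
      · rw [if_pos hcon]
        have hmap : (d.items.map (fun p => if (p.1 == PySem.Str.upper lvl) = true then (PySem.Str.upper lvl, nn) else p)).map (pvUpdP c nn L')
            = d.items.map (pvUpdP c nn (lvl :: L')) := by
          rw [List.map_map]
          apply List.map_congr_left
          intro p _
          simp only [Function.comp]
          by_cases hp : p.1 = PySem.Str.upper lvl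
          · rw [if_pos (by simp [hp])]
            unfold pvUpdP
            rw [if_neg (by intro hk; exact hnotin hk.1)]
            rw [if_pos (by
              constructor
              · simp [hp]
              · show pvMtc (PySem.Str.lower p.1) c = true
                rw [hp, hlv]; exact hmc)]
            simp [hp]
          · rw [if_neg (by simp [hp])]
            unfold pvUpdP
            simp only [List.map_cons, List.mem_cons]
            by_cases h2 : p.1 ∈ L'.map PySem.Str.upper <;> simp [h2, hp]
        rw [hmap]
        simp [hcon]
      · rw [if_neg hcon]
        have hcon' : d.contains (PySem.Str.upper lvl) = false := by
          cases hc2 : d.contains (PySem.Str.upper lvl)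
          · rfl
          · exact absurd hc2 hcon
        have hnone : ∀ p ∈ d.items, (p.1 == PySem.Str.upper lvl) = false := by
          intro p hp
          cases hb : (p.1 == PySem.Str.upper lvl)
          · rfl
          · exfalso
            apply hcon
            unfold PySem.Dict.contains
            exact List.any_eq_true.mpr ⟨p, hp, hb⟩
        rw [List.map_append]
        have hmap : d.items.map (pvUpdP c nn L') = d.items.map (pvUpdP c nn (lvl :: L')) := by
          apply List.map_congr_left
          intro p hp
          have hp1 : p.1 ≠ PySem.Str.upper lvl := by
            have := hnone p hp
            simpa using this
          unfold pvUpdP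
          simp only [List.map_cons, List.mem_cons]
          by_cases h2 : p.1 ∈ L'.map PySem.Str.upper <;> simp [h2, hp1]
        rw [hmap]
        have hupd : (pvUpdP c nn L') (PySem.Str.upper lvl, nn) = (PySem.Str.upper lvl, nn) := by
          unfold pvUpdP
          rw [if_neg (by intro hk; exact hnotin hk.1)]
        simp only [List.map_cons, List.map_nil, hupd]
        simp [hcon']

lemma pv_contains_iff (h : List String) (lvl : String) (hl : lvl ∈ pvLvls) :
    (PySem.Dict.mk (pvBitems h)).contains (PySem.Str.upper lvl) = false ↔ pvHits h lvl = [] := by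
  have hinj : ∀ l1 ∈ pvLvls, ∀ l2 ∈ pvLvls, PySem.Str.upper l1 = PySem.Str.upper l2 → l1 = l2 := by
    decide
  rw [PySem.Dict.contains_mk]
  rw [List.any_eq_false]
  unfold pvBitems
  constructor
  · intro hall
    by_contra hne
    obtain ⟨f, t, hts⟩ := List.exists_cons_of_ne_nil hne
    have hent := pvEntry_cons h lvl f t hts
    have hmem : (f, PySem.Str.upper lvl, (f :: t).getLast (List.cons_ne_nil f t)) ∈ pvE h pvLvls := by
      apply List.mem_flatMap.mpr
      exact ⟨lvl, hl, by rw [hent]; exact List.mem_cons_self⟩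
    have hmemS := ((pvS_perm h).mem_iff).mpr hmem
    have := hall _ (List.mem_map_of_mem hmemS)
    simp at this
  · intro hnil p hp
    obtain ⟨t, ht, rfl⟩ := List.mem_map.mp hp
    have htE : t ∈ pvE h pvLvls := ((pvS_perm h).mem_iff).mp ht
    obtain ⟨lvl', hlvl', hte⟩ := List.mem_flatMap.mp htE
    have hname := pvEntry_name h lvl' t hte
    simp only [ne_eq]
    intro hEq
    have : lvl' = lvl := hinj lvl' hlvl' lvl hl (by rw [← hname]; exact eq_of_beq hEq)
    subst this
    have : pvEntry h lvl' = [] := (pvEntry_eq_nil_iff h lvl').mpr hnil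
    rw [this] at hte
    simp at hte

lemma pv_names_covered (h : List String) :
    ∀ t ∈ pvS h, t.2.1 ∈ pvLvls.map PySem.Str.upper := by
  intro t ht
  have htE : t ∈ pvE h pvLvls := ((pvS_perm h).mem_iff).mp ht
  obtain ⟨lvl', hlvl', hte⟩ := List.mem_flatMap.mp htE
  rw [pvEntry_name h lvl' t hte]
  exact List.mem_map_of_mem hlvl'

lemma pv_main (h : List String) : pvAdict h = PySem.Dict.mk (pvBitems h) := by
  induction h using List.reverseRecOn with
  | nil => decide
  | append_singleton h c ih =>
    rw [pv_stepA, ih]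
    apply PySem.Dict.ext
    rw [pvChain_items c (h.length : Int) pvLvls (PySem.Dict.mk (pvBitems h))
      (by decide) (by decide)]
    have hs : pvS (h ++ [c]) = (pvS h).map (pvUpdE c (h.length : Int)) ++ pvNewsS h c pvLvls := by
      rw [pvS_eq_fold, pvS_eq_fold]
      have hf := pvFold c h pvLvls [] [] (by decide) (by simp) (by simp)
      simpa using hf
    show List.map (pvUpdP c (h.length : Int) pvLvls) (pvBitems h) ++ _ = pvBitems (h ++ [c])
    rw [show pvBitems (h ++ [c]) = (pvS (h ++ [c])).map (fun t => (t.2.1, t.2.2)) from rfl,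
      hs, List.map_append]
    congr 1
    · rw [show pvBitems h = (pvS h).map (fun t => (t.2.1, t.2.2)) from rfl]
      rw [List.map_map, List.map_map]
      apply List.map_congr_left
      intro t ht
      have hcov := pv_names_covered h t ht
      simp only [Function.comp]
      unfold pvUpdP pvUpdE
      by_cases hm : pvMtc (PySem.Str.lower t.2.1) c = true
      · rw [if_pos hm]
        rw [if_pos ⟨hcov, hm⟩]
      · rw [if_neg hm]
        rw [if_neg (by intro hk; exact hm hk.2)]
    · unfold pvNewsS
      rw [List.map_flatMap]
      apply pv_flatMap_congr
      intro lvl hlvl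
      by_cases hmc : pvMtc lvl c = true
      · by_cases hnil : pvHits h lvl = []
        · rw [if_pos ⟨hmc, (pv_contains_iff h lvl hlvl).mpr hnil⟩,
            if_pos ⟨hmc, hnil⟩]
          simp
        · rw [if_neg (by
            intro hk
            exact hnil ((pv_contains_iff h lvl hlvl).mp hk.2)),
            if_neg (by intro hk; exact hnil hk.2)]
          simp
      · rw [if_neg (by intro hk; exact hmc hk.1), if_neg (by intro hk; exact hmc hk.1)]
        simp

-- ==== new: Pre_ makes the stable sort the identity ====

lemma pv_keymap (h : List String) :
    ∀ L : List String, (L.flatMap (pvEntry h)).map (fun t => t.1)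
      = L.filterMap (fun lvl => (pvHits h lvl).head?) := by
  intro L
  induction L with
  | nil => rfl
  | cons lvl L' ih =>
    simp only [List.flatMap_cons, List.map_append, List.filterMap_cons, ih]
    cases hts : pvHits h lvl with
    | nil =>
      rw [(pvEntry_eq_nil_iff h lvl).mpr hts]
      simp
    | cons f t =>
      rw [pvEntry_cons h lvl f t hts]
      simp

lemma pv_sorted_id (h : List String) (hpre : Pre_find_applicability_columns_py h) :
    pvS h = pvE h pvLvls := by
  apply PySem.List.sorted_eq_self_of_pairwise
  have hkeys : ((pvE h pvLvls).map (fun t => t.1)).Pairwise (· ≤ ·) := by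
    rw [pvE, pv_keymap h pvLvls]
    exact hpre
  exact (List.pairwise_map).mp hkeys

-- ==== new: port B computes the entries in level order ====

lemma pvfr (p : Int → Bool) (l : List Int) : (l.reverse).find? p = (l.filter p).getLast? := by
  induction l with
  | nil => rfl
  | cons x l ih =>
    rw [List.reverse_cons, List.find?_append, ih, List.filter_cons]
    split
    · rename_i hp
      cases hl : List.filter p l with
      | nil => simp [List.find?, hp]
      | cons y t =>
        rw [List.getLast?_eq_some_getLast (List.cons_ne_nil y t)]
        rfl
    · rename_i hp
      simp [hp]

lemma pv_filter_range (h : List String) (lvl : String) :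
    (PySem.List.pyRange 0 (h.length : Int) 1).filter
        (fun i => PySem.Str.isIn lvl (PySem.Str.lower (PySem.List.pyGetD h i ""))) = pvHits h lvl := by
  induction h using List.reverseRecOn with
  | nil => simp [PySem.List.pyRange_one_eq_nil, pvHits, PySem.List.enumerate_nil]
  | append_singleton h c ih =>
    have hlen : ((h ++ [c]).length : Int) = (h.length : Int) + 1 := by simp
    rw [hlen]
    rw [PySem.List.pyRange_one_succ_right (Int.natCast_nonneg _)]
    rw [List.filter_append]
    rw [pvHits_append]
    have h1 : (PySem.List.pyRange 0 (h.length : Int) 1).filter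
        (fun i => PySem.Str.isIn lvl (PySem.Str.lower (PySem.List.pyGetD (h ++ [c]) i ""))) = pvHits h lvl := by
      rw [← ih]
      apply List.filter_congr
      intro i hi
      rw [PySem.List.mem_pyRange_one] at hi
      have hget : PySem.List.pyGetD (h ++ [c]) i "" = PySem.List.pyGetD h i "" := by
        rw [PySem.List.pyGetD_eq_getElem _ _ hi.1 (by simp; omega),
          PySem.List.pyGetD_eq_getElem _ _ hi.1 (by exact_mod_cast hi.2)]
        exact List.getElem_append_left _
      rw [hget]
    have hget : PySem.List.pyGetD (h ++ [c]) (h.length : Int) "" = c := by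
      rw [PySem.List.pyGetD_eq_getElem _ _ (Int.natCast_nonneg _) (by simp)]
      simp
    have h2 : ([(h.length : Int)].filter
        (fun i => PySem.Str.isIn lvl (PySem.Str.lower (PySem.List.pyGetD (h ++ [c]) i ""))))
        = (if pvMtc lvl c then [(h.length : Int)] else []) := by
      rw [List.filter_singleton, hget]
      simp [pvMtc, PySem.Str.isIn, Bool.cond_eq_ite]
    rw [h1, h2]

lemma pv_find_last (h : List String) (lvl : String) :
    (PySem.List.pyRange ((h.length : Int) - 1) (-1) (-1)).find?
        (fun i => PySem.Str.isIn lvl (PySem.Str.lower (PySem.List.pyGetD h i "")))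
      = (pvHits h lvl).getLast? := by
  have hr : PySem.List.pyRange ((h.length : Int) - 1) (-1) (-1)
      = (PySem.List.pyRange 0 (h.length : Int) 1).reverse := by
    rw [PySem.List.pyRange_neg_one_eq_reverse]
    norm_num
  rw [hr, pvfr, pv_filter_range]

-- the four levels produce distinct uppercase names, so every insert in port B is fresh
lemma pv_foldB (h : List String) :
    ∀ (L : List String) (d : PySem.Dict String Int),
    (∀ lvl ∈ L, d.contains (PySem.Str.upper lvl) = false) →
    (L.map PySem.Str.upper).Nodup →
    (L.foldl
      (fun d lvl =>
        match (PySem.List.pyRange ((h.length : Int) - 1) (-1) (-1)).find?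
            (fun idx => PySem.Str.isIn lvl (PySem.Str.lower (PySem.List.pyGetD h idx ""))) with
        | some idx => d.insert (PySem.Str.upper lvl) idx
        | none => d) d).items
      = d.items ++ (L.flatMap (pvEntry h)).map (fun t => (t.2.1, t.2.2)) := by
  intro L
  induction L with
  | nil => intro d _ _; simp
  | cons lvl L' ih =>
    intro d hfr hnd
    have hnd' : (L'.map PySem.Str.upper).Nodup := by
      simp only [List.map_cons, List.nodup_cons] at hnd
      exact hnd.2
    have hnotin : PySem.Str.upper lvl ∉ L'.map PySem.Str.upper := by
      simp only [List.map_cons, List.nodup_cons] at hnd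
      exact hnd.1
    simp only [List.foldl_cons, List.flatMap_cons, List.map_append]
    rw [pv_find_last h lvl]
    cases hts : pvHits h lvl with
    | nil =>
      rw [(pvEntry_eq_nil_iff h lvl).mpr hts]
      simp only [List.map_nil, List.nil_append]
      exact ih d (fun l hl => hfr l (List.mem_cons_of_mem _ hl)) hnd'
    | cons f t =>
      rw [List.getLast?_eq_some_getLast (List.cons_ne_nil f t)]
      rw [pvEntry_cons h lvl f t hts]
      have hfr' : ∀ l ∈ L',
          ((d.insert (PySem.Str.upper lvl) ((f :: t).getLast (List.cons_ne_nil f t))).contains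
            (PySem.Str.upper l)) = false := by
        intro l hl
        rw [PySem.Dict.contains_insert]
        have hne : (PySem.Str.upper l == PySem.Str.upper lvl) = false := by
          simp only [beq_eq_false_iff_ne, ne_eq]
          intro hEq
          exact hnotin (hEq ▸ List.mem_map_of_mem hl)
        rw [hne]
        simp [hfr l (List.mem_cons_of_mem _ hl)]
      rw [ih _ hfr' hnd']
      rw [PySem.Dict.items_insert]
      have hcon : d.contains (PySem.Str.upper lvl) = false := hfr lvl List.mem_cons_self
      rw [if_neg (by simp [hcon])]
      simp

lemma pv_portB_eq (h : List String) :
    find_applicability_columns_py_alt h = (pvE h pvLvls).map (fun t => (t.2.1, t.2.2)) := by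
  unfold find_applicability_columns_py_alt
  have := pv_foldB h pvLvls PySem.Dict.empty
    (fun lvl _ => PySem.Dict.contains_empty _) (by decide)
  simpa [pvLvls, pvE] using this

-- ===== VERDICT (by name: the statement is the Claim_ definition above) =====
theorem find_applicability_columns_py_spec : Claim_equal_find_applicability_columns_py := by
  intro h _ hpre
  unfold Spec_find_applicability_columns_py
  rw [pv_portA_eq, pv_main, pv_portB_eq, ← pv_sorted_id h hpre]
  rfl
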